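-- pv_equiv track=rewrite | github.com/gauravtrivedi967/DocsGPT | gitscrapper.py | extract_keyword_sections
-- ===== SOURCE A (Python) =====
-- def extract_keyword_sections(content, keyword):
--     keyword_sections = []
--     lines = content.split('\n')
--     current_section = []
--
--     for line in lines:
--         if keyword in line:
--             if current_section:
--                 keyword_sections.append("\n".join(current_section))
--                 current_section = []
--         current_section.append(line)
--
--     if current_section:
--         keyword_sections.append("\n".join(current_section))
--
--     return keyword_sections
-- ===== SOURCE B (Python) =====
-- def extract_keyword_sections(content, keyword):
--     lines = content.split('\n')
--     starts = [0] + [i for i in range(1, len(lines)) if keyword in lines[i]]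
--     ends = starts[1:] + [len(lines)]
--     return ["\n".join(lines[s:e]) for s, e in zip(starts, ends)]
-- ===== Notes on version B (the rewrite author's own statement) =====
-- stated objective: alternative
-- what changed: Replaces A's single-pass accumulate-and-flush state machine (a growing current_section list with conditional flushes and a trailing flush) by a two-phase 'find boundaries, then slice' shape: first compute the list of segment-start indices (0 plus every i>=1 whose line contains the keyword), then join consecutive slices lines[s:e].
import Mathlib
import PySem

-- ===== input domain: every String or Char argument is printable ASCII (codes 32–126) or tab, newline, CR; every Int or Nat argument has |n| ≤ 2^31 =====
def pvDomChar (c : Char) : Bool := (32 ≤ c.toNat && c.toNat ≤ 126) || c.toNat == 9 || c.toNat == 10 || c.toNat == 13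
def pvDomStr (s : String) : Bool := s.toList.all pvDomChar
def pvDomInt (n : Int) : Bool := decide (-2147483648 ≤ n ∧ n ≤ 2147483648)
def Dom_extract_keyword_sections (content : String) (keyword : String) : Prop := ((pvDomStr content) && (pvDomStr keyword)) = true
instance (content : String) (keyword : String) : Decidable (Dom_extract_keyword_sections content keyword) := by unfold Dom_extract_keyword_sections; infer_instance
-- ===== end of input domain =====

-- B replaces A's accumulate-and-flush state machine by a two-phase "find boundary indices, then
-- slice between consecutive boundaries" decomposition; same results, same linear cost.


-- ===== PORT A =====
-- one loop step of A: maybe flush current_section, then append the line to it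
def pvStepA (keyword : String) (st : List String × List String) (line : String) : List String × List String :=
  let st' :=
    if PySem.Str.isIn keyword line then
      if st.2.isEmpty then st else (st.1 ++ [PySem.Str.join "\n" st.2], [])
    else st
  (st'.1, st'.2 ++ [line])

def extract_keyword_sections (content : String) (keyword : String) : List String :=
  let lines := (PySem.Str.split? content "\n").getD []
  let r := lines.foldl (pvStepA keyword) ([], [])
  if r.2.isEmpty then r.1 else r.1 ++ [PySem.Str.join "\n" r.2]

-- ===== PORT B =====
def extract_keyword_sections_alt (content : String) (keyword : String) : List String :=
  let lines := (PySem.Str.split? content "\n").getD []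
  let n : Int := lines.length
  let starts : List Int :=
    0 :: (PySem.List.pyRange 1 n).filter (fun i => PySem.Str.isIn keyword (PySem.List.pyGetD lines i ""))
  let ends : List Int := starts.tail ++ [n]
  (starts.zip ends).map (fun p => PySem.Str.join "\n" (PySem.List.slice lines (some p.1) (some p.2)))

-- ===== PRECONDITION & SPEC =====
def Spec_extract_keyword_sections (content : String) (keyword : String) (out : List String) : Prop := out = extract_keyword_sections_alt content keyword
instance (content : String) (keyword : String) (out : List String) : Decidable (Spec_extract_keyword_sections content keyword out) := by unfold Spec_extract_keyword_sections; infer_instance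

-- ===== CLAIM (what is proved, stated in full; the proofs are below) =====
def Claim_equal_extract_keyword_sections : Prop := ∀ (content : String) (keyword : String), Dom_extract_keyword_sections content keyword → Spec_extract_keyword_sections content keyword (extract_keyword_sections content keyword)

-- ===== LEMMAS AND PROOFS =====


-- common recursive specification: sections of `cur ++ rest` where `cur` is the open section
def pvSpecAux (kw : String) (cur : List String) : List String → List String
  | [] => [PySem.Str.join "\n" cur]
  | l :: ls =>
    if PySem.Str.isIn kw l then PySem.Str.join "\n" cur :: pvSpecAux kw [l] ls
    else pvSpecAux kw (cur ++ [l]) ls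

-- recursive form of B's "consecutive slices" phase
def pvSecsFrom (L : List String) (t : Int) : List Int → List String
  | [] => [PySem.Str.join "\n" (PySem.List.slice L (some t) (some (L.length : Int)))]
  | e :: rest => PySem.Str.join "\n" (PySem.List.slice L (some t) (some e)) :: pvSecsFrom L e rest

theorem pvSplitGo_ne_nil (sep : List Char) (fuel : Nat) (l cur : List Char) (acc : List (List Char)) :
    PySem.Chars.splitOn.go sep fuel l cur acc ≠ [] := by
  induction fuel generalizing l cur acc with
  | zero => simp [PySem.Chars.splitOn.go]
  | succ n ih =>
    cases l with
    | nil => simp [PySem.Chars.splitOn.go]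
    | cons c rest =>
      simp only [PySem.Chars.splitOn.go]
      split
      · exact ih _ _ _
      · exact ih _ _ _

theorem pvSplit_ne_nil (content : String) : (PySem.Str.split? content "\n").getD [] ≠ [] := by
  have h : PySem.Chars.split? content.toList "\n".toList
      = some (PySem.Chars.splitOn content.toList "\n".toList) := by
    simp [PySem.Chars.split?]
  rcases hs : PySem.Str.split? content "\n" with _ | xs
  · exfalso
    have hmap := PySem.Str.split?_map content "\n"
    rw [hs, h] at hmap
    simp at hmap
  · have hmap := PySem.Str.split?_map content "\n"
    rw [hs, h] at hmap
    simp only [Option.map_some, Option.some.injEq] at hmap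
    intro hx
    simp only [Option.getD_some] at hx
    subst hx
    simp only [List.map_nil] at hmap
    rw [PySem.Chars.splitOn] at hmap
    exact pvSplitGo_ne_nil _ _ _ _ _ hmap.symm

-- A's loop, with a nonempty open section, computes pvSpecAux
theorem pvA_loop (kw : String) (ls : List String) :
    ∀ (secs cur : List String), cur ≠ [] →
      (let r := ls.foldl (pvStepA kw) (secs, cur);
       if r.2.isEmpty then r.1 else r.1 ++ [PySem.Str.join "\n" r.2])
        = secs ++ pvSpecAux kw cur ls := by
  induction ls with
  | nil =>
    intro secs cur h
    simp [pvSpecAux, List.isEmpty_iff, h]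
  | cons l ls ih =>
    intro secs cur h
    rw [List.foldl_cons, pvSpecAux]
    by_cases hkw : PySem.Str.isIn kw l
    · have hstep : pvStepA kw (secs, cur) l = (secs ++ [PySem.Str.join "\n" cur], [l]) := by
        unfold pvStepA
        rw [hkw]
        simp [List.isEmpty_iff, h]
      rw [hstep, ih _ _ (by simp), hkw]
      simp
    · have hstep : pvStepA kw (secs, cur) l = (secs, cur ++ [l]) := by
        unfold pvStepA
        rw [Bool.of_not_eq_true hkw]
        simp
      rw [hstep, ih _ _ (by simp), Bool.of_not_eq_true hkw]
      simp

-- B's zip-of-consecutive-starts phase is pvSecsFrom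
theorem pvB_zip (L : List String) (S : List Int) : ∀ (s : Int),
    (((s :: S).zip ((s :: S).tail ++ [(L.length : Int)])).map
      (fun p => PySem.Str.join "\n" (PySem.List.slice L (some p.1) (some p.2))))
      = pvSecsFrom L s S := by
  induction S with
  | nil => intro s; simp [pvSecsFrom]
  | cons e rest ih =>
    intro s
    simp only [List.tail_cons, pvSecsFrom]
    rw [← ih e]
    simp

-- the bridge: boundaries-then-slices equals the accumulate spec, walking the list by index
theorem pvG (kw : String) (L : List String) : ∀ (d s t : Nat), L.length - s = d → t < s → s ≤ L.length →
    pvSpecAux kw ((L.drop t).take (s - t)) (L.drop s)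
      = pvSecsFrom L (t : Int)
          (((PySem.List.pyRange (s : Int) (L.length : Int)).filter
            (fun i => PySem.Str.isIn kw (PySem.List.pyGetD L i "")))) := by
  intro d
  induction d with
  | zero =>
    intro s t hd hts hsl
    have hs : s = L.length := by omega
    subst hs
    have hr : PySem.List.pyRange (L.length : Int) (L.length : Int) = [] := by
      simp [PySem.List.pyRange]
    rw [hr]
    simp only [List.filter_nil, pvSecsFrom, List.drop_length, pvSpecAux]
    rw [PySem.List.slice_natCast]
  | succ d ih =>
    intro s t hd hts hsl
    have hsn : s < L.length := by omega
    have hdrop : L.drop s = L[s] :: L.drop (s + 1) := List.drop_eq_getElem_cons hsn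
    have hr : PySem.List.pyRange (s : Int) (L.length : Int)
        = (s : Int) :: PySem.List.pyRange ((s : Int) + 1) (L.length : Int) :=
      PySem.List.pyRange_one_cons (by exact_mod_cast hsn)
    have hget : PySem.List.pyGetD L (s : Int) "" = L[s] := by
      rw [PySem.List.pyGetD_natCast]
      exact List.getD_eq_getElem L "" hsn
    have hcast : ((s : Int) + 1) = ((s + 1 : Nat) : Int) := by push_cast; ring
    have htake : (L.drop t).take (s + 1 - t) = (L.drop t).take (s - t) ++ [L[s]] := by
      rw [show s + 1 - t = (s - t) + 1 from by omega, List.take_add_one, List.getElem?_drop,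
        show t + (s - t) = s from by omega, List.getElem?_eq_getElem hsn]
      rfl
    rw [hdrop, hr]
    simp only [List.filter_cons, hget]
    by_cases hkw : PySem.Str.isIn kw L[s]
    · simp only [hkw, if_true, pvSpecAux, pvSecsFrom]
      simp only [List.cons.injEq]
      refine ⟨?_, ?_⟩
      · rw [PySem.List.slice_natCast]
      · have hih := ih (s + 1) s (by omega) (by omega) (by omega)
        rw [hcast, ← hih]
        congr 1
        rw [show s + 1 - s = 1 from by omega, hdrop]
        rfl
    · simp only [hkw, if_false, pvSpecAux, Bool.false_eq_true]
      have hih := ih (s + 1) t (by omega) (by omega) (by omega)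
      rw [hcast, ← hih, htake]

-- both phases agree on any nonempty line list
theorem pvMain (kw : String) (L : List String) (hne : L ≠ []) :
    (let r := L.foldl (pvStepA kw) ([], []);
     if r.2.isEmpty then r.1 else r.1 ++ [PySem.Str.join "\n" r.2])
      = (let n : Int := L.length;
         let starts : List Int :=
           0 :: (PySem.List.pyRange 1 n).filter (fun i => PySem.Str.isIn kw (PySem.List.pyGetD L i ""));
         (starts.zip (starts.tail ++ [n])).map
           (fun p => PySem.Str.join "\n" (PySem.List.slice L (some p.1) (some p.2)))) := by
  obtain ⟨l0, ls, rfl⟩ := List.exists_cons_of_ne_nil hne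
  have hfirst : pvStepA kw ([], []) l0 = ([], [l0]) := by
    unfold pvStepA
    simp
  simp only [List.foldl_cons, hfirst]
  rw [pvA_loop kw ls [] [l0] (by simp)]
  rw [pvB_zip (l0 :: ls) _ 0]
  have hG := pvG kw (l0 :: ls) ((l0 :: ls).length - 1) 1 0 rfl (by omega) (by simp)
  simp only [List.drop_zero, List.drop_one, List.tail_cons, Nat.sub_zero,
    Nat.cast_zero, Nat.cast_one] at hG
  rw [← hG]
  simp

-- ===== VERDICT (by name: the statement is the Claim_ definition above) =====
theorem extract_keyword_sections_spec : Claim_equal_extract_keyword_sections := by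
  intro content keyword _
  unfold Spec_extract_keyword_sections
  exact pvMain keyword ((PySem.Str.split? content "\n").getD []) (pvSplit_ne_nil content)
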